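-- pv_equiv track=rewrite | github.com/LoicGrobol/apprentissage-artificiel | corrections/carte.py | gagne_couleur
-- ===== SOURCE A (Python) =====
-- def gagne_couleur(carte1, carte2, carte3, carte4):
--     """Affiche la carte qui remporte le pli en faisant attention aux couleurs :
--         - la carte du premier joueur `carte1` donne la couleur attendue.
--         - une carte qui n'est pas à la bonne couleur perd automatiquement.
--
--     On ne gèrera pas certains cas incohérents comme une carte ou un pli invalide.
--     """
--     def gagne(carte1, carte2, couleur):  # on peut aussi définir une fonction dans une fonction
--         if carte2[0] != couleur:
--             return carte1
--         elif int(carte1[1:]) < int(carte2[1:]):  # carte1 est forcément valide, pas besoin de vérifier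
--             return carte2
--         else:
--             return carte1
--     couleur = carte1[0]
--     gagnante = carte1
--     for carte in [carte2, carte3, carte4]:
--         gagnante = gagne(gagnante, carte, couleur)
--     return gagnante
-- ===== SOURCE B (Python) =====
-- def gagne_couleur(carte1, carte2, carte3, carte4):
--     couleur = carte1[0]
--     suivies = [c for c in (carte2, carte3, carte4) if c[0] == couleur]
--     if not suivies:
--         return carte1
--     ordre = sorted([carte1] + suivies, key=lambda c: int(c[1:]), reverse=True)
--     return ordre[0]
-- ===== Notes on version B (the rewrite author's own statement) =====
-- stated objective: alternative
-- what changed: A's pairwise 'gagne' helper and running-winner loop are replaced by a staged pipeline: filter the cards that follow carte1's suit, stable-sort the candidates by rank descending (Python's stable sort keeps the earlier card first among equal ranks, matching A's earlier-card-wins tie-breaking) and take the head.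
import Mathlib
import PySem

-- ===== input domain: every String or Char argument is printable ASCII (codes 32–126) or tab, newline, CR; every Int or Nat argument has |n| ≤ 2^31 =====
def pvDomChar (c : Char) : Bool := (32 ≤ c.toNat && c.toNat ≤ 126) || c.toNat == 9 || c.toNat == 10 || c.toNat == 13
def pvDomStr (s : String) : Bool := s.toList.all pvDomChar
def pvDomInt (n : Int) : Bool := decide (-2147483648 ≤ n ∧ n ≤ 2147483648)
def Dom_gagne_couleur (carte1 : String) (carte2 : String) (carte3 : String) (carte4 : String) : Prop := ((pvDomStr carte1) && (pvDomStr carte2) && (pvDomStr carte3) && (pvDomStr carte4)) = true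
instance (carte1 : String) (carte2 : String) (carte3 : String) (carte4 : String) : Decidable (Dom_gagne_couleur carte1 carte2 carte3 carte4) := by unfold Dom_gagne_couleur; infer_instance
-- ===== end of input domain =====

-- B replaces A's pairwise-comparison helper and running-winner loop by a staged pipeline:
-- filter the cards following carte1's suit, stable-sort the candidates by rank descending
-- (stability keeps the earlier card first among equal ranks, like A), take the head; same cost.

-- ===== PORT A =====
-- int(c[1:]) in A is only reached where Pre_ guarantees it parses; getD 0 is the total stand-in.
def pvGagne (carte1 : String) (carte2 : String) (couleur : Option Char) : String :=
  if PySem.Str.pyGet? carte2 0 ≠ couleur then carte1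
  else if (PySem.Int.ofStr? (PySem.Str.slice carte1 (some 1) none)).getD 0 <
          (PySem.Int.ofStr? (PySem.Str.slice carte2 (some 1) none)).getD 0 then carte2
  else carte1

def gagne_couleur (carte1 : String) (carte2 : String) (carte3 : String) (carte4 : String) : String :=
  let couleur := PySem.Str.pyGet? carte1 0
  [carte2, carte3, carte4].foldl (fun gagnante carte => pvGagne gagnante carte couleur) carte1

-- ===== PORT B =====
-- the key lambda of Source B's sorted; getD 0 is the total stand-in for int(c[1:]) (parses under Pre_)
def pvKey (c : String) : Int := (PySem.Int.ofStr? (PySem.Str.slice c (some 1) none)).getD 0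

def gagne_couleur_alt (carte1 : String) (carte2 : String) (carte3 : String) (carte4 : String) : String :=
  let couleur := PySem.Str.pyGet? carte1 0
  let suivies := [carte2, carte3, carte4].filter (fun c => PySem.Str.pyGet? c 0 == couleur)
  if suivies.isEmpty then carte1
  else (PySem.List.sorted (carte1 :: suivies) pvKey true).headD carte1
    -- ordre[0]: the sorted list is nonempty (carte1 is in it), so headD's default is unreachable

-- ===== PRECONDITION & SPEC =====
-- Pre_ excludes exactly the inputs on which the Python A raises: an empty card string
-- (IndexError on carte[0]) or, when some later card follows carte1's suit, a card among
-- {carte1, that card} whose tail is not a valid int literal (ValueError in int()).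
def Pre_gagne_couleur (carte1 : String) (carte2 : String) (carte3 : String) (carte4 : String) : Prop :=
  carte1.toList ≠ [] ∧ carte2.toList ≠ [] ∧ carte3.toList ≠ [] ∧ carte4.toList ≠ [] ∧
  (∀ c ∈ [carte2, carte3, carte4], c.toList.head? = carte1.toList.head? →
      (PySem.Int.ofStr? (PySem.Str.slice c (some 1) none)).isSome ∧
      (PySem.Int.ofStr? (PySem.Str.slice carte1 (some 1) none)).isSome)
instance (carte1 : String) (carte2 : String) (carte3 : String) (carte4 : String) : Decidable (Pre_gagne_couleur carte1 carte2 carte3 carte4) := by unfold Pre_gagne_couleur; infer_instance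

def pvWitness_gagne_couleur : String × String × String × String := ("S7", "S10", "H2", "S3")

def Spec_gagne_couleur (carte1 : String) (carte2 : String) (carte3 : String) (carte4 : String) (out : String) : Prop := out = gagne_couleur_alt carte1 carte2 carte3 carte4
instance (carte1 : String) (carte2 : String) (carte3 : String) (carte4 : String) (out : String) : Decidable (Spec_gagne_couleur carte1 carte2 carte3 carte4 out) := by unfold Spec_gagne_couleur; infer_instance

-- ===== CLAIM (what is proved, stated in full; the proofs are below) =====
def Claim_equal_gagne_couleur : Prop := ∀ (carte1 : String) (carte2 : String) (carte3 : String) (carte4 : String), Dom_gagne_couleur carte1 carte2 carte3 carte4 → Pre_gagne_couleur carte1 carte2 carte3 carte4 → Spec_gagne_couleur carte1 carte2 carte3 carte4 (gagne_couleur carte1 carte2 carte3 carte4)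

-- ===== LEMMAS AND PROOFS =====

-- A's helper, written as a filter-style strict-improvement step
lemma pvGagne_eq (g c : String) (couleur : Option Char) :
    pvGagne g c couleur
      = if (PySem.Str.pyGet? c 0 == couleur) then (if pvKey g < pvKey c then c else g) else g := by
  simp only [pvGagne, pvKey, ite_not, beq_iff_eq]
  split <;> rfl

-- inserting into a nonempty reverse-ordered accumulator: the new head is the strict-improvement step
lemma insertBy_rev_head (c m : String) (r : List String) :
    ∃ r', PySem.List.insertBy (fun a b => decide (pvKey b < pvKey a)) c (m :: r)
            = (if pvKey m < pvKey c then c else m) :: r' := by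
  have hstep : PySem.List.insertBy (fun a b => decide (pvKey b < pvKey a)) c (m :: r)
      = if decide (pvKey m < pvKey c) = true then c :: m :: r
        else m :: PySem.List.insertBy (fun a b => decide (pvKey b < pvKey a)) c r := rfl
  rw [hstep]
  by_cases h : pvKey m < pvKey c
  · exact ⟨m :: r, by simp [h]⟩
  · exact ⟨PySem.List.insertBy (fun a b => decide (pvKey b < pvKey a)) c r, by simp [h]⟩

-- the head of the insertion-sort fold is A's running winner
lemma foldl_insertBy_head (t : List String) : ∀ (m : String) (r : List String),
    (t.foldl (fun acc x => PySem.List.insertBy (fun a b => decide (pvKey b < pvKey a)) x acc)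
        (m :: r)).head?
      = some (t.foldl (fun g c => if pvKey g < pvKey c then c else g) m) := by
  induction t with
  | nil => intro m r; rfl
  | cons c t ih =>
      intro m r
      obtain ⟨r', hr⟩ := insertBy_rev_head c m r
      simp only [List.foldl, hr, ih]

-- head of the reverse stable sort of a nonempty list = A's running winner over its tail
lemma sorted_rev_head (x : String) (t : List String) :
    (PySem.List.sorted (x :: t) pvKey true).headD x
      = t.foldl (fun g c => if pvKey g < pvKey c then c else g) x := by
  have h := foldl_insertBy_head t x []
  rw [PySem.List.sorted_rev_eq_foldl_insertBy]
  simp only [List.foldl]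
  have hins : PySem.List.insertBy (fun a b => decide (pvKey b < pvKey a)) x ([] : List String)
      = [x] := rfl
  rw [hins, List.headD_eq_head?_getD, h]
  rfl

-- ===== VERDICT (by name: the statement is the Claim_ definition above) =====
theorem gagne_couleur_spec : Claim_equal_gagne_couleur := by
  intro c1 c2 c3 c4 _ _
  unfold Spec_gagne_couleur gagne_couleur gagne_couleur_alt
  simp only [pvGagne_eq]
  rw [PySem.List.foldl_if_eq_foldl_filter]
  cases h : [c2, c3, c4].filter (fun c => PySem.Str.pyGet? c 0 == PySem.Str.pyGet? c1 0) with
  | nil => simp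
  | cons y t =>
      rw [if_neg (by simp)]
      rw [sorted_rev_head]
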